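-- pv_equiv track=rewrite | github.com/foobuzz/todo | source/todo/core.py | parse_task_full_content
-- ===== SOURCE A (Python) =====
-- def parse_task_full_content(full_content):
-- 	"""
-- 	Return a tuple (title, content) extracted from the content found in a file
-- 	edited through `todo edit` or `todo add [<title>] --edit`
-- 	"""
-- 	title, content = '', None
-- 	state = 'number_title' if full_content.startswith('# ') else 'title'
-- 	lines = full_content.splitlines(keepends=True)
-- 	for i, line in enumerate(lines):
-- 		if state == 'title' and line.startswith('==='):
-- 			state = 'content'
-- 			continue
-- 		if state == 'number_title' and line.startswith('\n'):
-- 			state = 'content'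
-- 		if state in ['title', 'number_title']:
-- 			title += line
-- 		if state == 'content':
-- 			if content is None:
-- 				content = ''
-- 			content += line
--
-- 	# Removes blank characters at the right of the title (newline leading to
-- 	# settext heading underlining and potential newline added by text editors)
-- 	title = title.rstrip()
--
-- 	if title.startswith('# '):
-- 		title = title[2:]
--
-- 	return title, content
-- ===== SOURCE B (Python) =====
-- def parse_task_full_content(full_content):
-- 	number_mode = full_content.startswith('# ')
-- 	lines = full_content.splitlines(keepends=True)
-- 	boundary = (lambda l: l.startswith('\n')) if number_mode else (lambda l: l.startswith('==='))
-- 	i = next((j for j, l in enumerate(lines) if boundary(l)), None)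
-- 	if i is None:
-- 		title, content = full_content, None
-- 	elif number_mode:
-- 		title, content = ''.join(lines[:i]), ''.join(lines[i:])
-- 	else:
-- 		rest = lines[i+1:]
-- 		title, content = ''.join(lines[:i]), ''.join(rest) if rest else None
-- 	title = title.rstrip()
-- 	if title.startswith('# '):
-- 		title = title[2:]
-- 	return title, content
-- ===== Notes on version B (the rewrite author's own statement) =====
-- stated objective: alternative
-- what changed: A threads a three-state machine ('title'/'number_title'/'content') through one accumulating loop; B determines the mode once, finds only the boundary line's index, and builds title and content by joining list slices.
import Mathlib
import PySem

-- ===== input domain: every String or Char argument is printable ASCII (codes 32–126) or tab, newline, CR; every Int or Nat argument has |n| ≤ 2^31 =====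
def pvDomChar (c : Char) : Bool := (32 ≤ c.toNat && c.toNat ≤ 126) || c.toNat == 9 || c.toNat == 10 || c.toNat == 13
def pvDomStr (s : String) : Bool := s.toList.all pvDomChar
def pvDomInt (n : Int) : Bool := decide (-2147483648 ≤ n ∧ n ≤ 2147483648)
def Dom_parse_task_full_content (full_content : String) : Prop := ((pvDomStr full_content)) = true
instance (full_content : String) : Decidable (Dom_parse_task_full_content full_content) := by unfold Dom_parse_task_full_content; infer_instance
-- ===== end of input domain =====

-- B changes A's three-state accumulator loop into "find the boundary line index, then join slices" (objective: alternative decomposition; same linear cost).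

-- shared helper: str.splitlines(keepends=True) on List Char — exact on the domain's
-- line breaks ('\n', '\r', '\r\n'; no other break characters occur in printable-ASCII+tab domain)
def pvSplitKeepAux : List Char → List Char → List (List Char)
  | cur, [] => if cur.isEmpty then [] else [cur.reverse]
  | cur, c :: rest =>
    if c = '\r' then
      if rest.head? = some '\n' then (cur.reverse ++ ['\r', '\n']) :: pvSplitKeepAux [] rest.tail
      else (cur.reverse ++ [c]) :: pvSplitKeepAux [] rest
    else if c = '\n' then (cur.reverse ++ [c]) :: pvSplitKeepAux [] rest
    else pvSplitKeepAux (c :: cur) rest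
termination_by _ s => s.length
decreasing_by all_goals (simp; try omega)

def pvSplitKeep (s : List Char) : List (List Char) := pvSplitKeepAux [] s

-- ===== PORT A =====
inductive PvMode | title | number_title | content
deriving DecidableEq, Repr

-- one iteration of A's for-loop, branches in source order
def pvAStep (st : List Char × Option (List Char) × PvMode) (line : List Char) :
    List Char × Option (List Char) × PvMode :=
  let (title, content, mode) := st
  if mode = PvMode.title ∧ PySem.Chars.startswith line ['=', '=', '='] then
    (title, content, PvMode.content)   -- continue
  else
    let mode := if mode = PvMode.number_title ∧ PySem.Chars.startswith line ['\n'] then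
        PvMode.content else mode
    let title := if mode = PvMode.title ∨ mode = PvMode.number_title then title ++ line else title
    let content := if mode = PvMode.content then some (content.getD [] ++ line) else content
    (title, content, mode)

def parse_task_full_content (full_content : String) : String × Option String :=
  let s := full_content.toList
  let state0 := if PySem.Chars.startswith s ['#', ' '] then PvMode.number_title else PvMode.title
  let r := (pvSplitKeep s).foldl pvAStep ([], none, state0)
  let title := PySem.Chars.rstrip r.1
  let title := if PySem.Chars.startswith title ['#', ' '] then
      PySem.Chars.slice title (some 2) none else title
  (String.ofList title, r.2.1.map String.ofList)

-- ===== PORT B =====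
def parse_task_full_content_alt (full_content : String) : String × Option String :=
  let s := full_content.toList
  let numberMode := PySem.Chars.startswith s ['#', ' ']
  let lines := pvSplitKeep s
  let i? := lines.findIdx? (fun l =>
    if numberMode then PySem.Chars.startswith l ['\n'] else PySem.Chars.startswith l ['=', '=', '='])
  let tc : List Char × Option (List Char) :=
    match i? with
    | none => (s, none)
    | some i =>
      if numberMode then ((lines.take i).flatten, some (lines.drop i).flatten)
      else
        let rest := lines.drop (i + 1)
        ((lines.take i).flatten, if rest.isEmpty then none else some rest.flatten)
  let title := PySem.Chars.rstrip tc.1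
  let title := if PySem.Chars.startswith title ['#', ' '] then
      PySem.Chars.slice title (some 2) none else title
  (String.ofList title, tc.2.map String.ofList)

-- ===== PRECONDITION & SPEC =====
def Spec_parse_task_full_content (full_content : String) (out : String × Option String) : Prop := out = parse_task_full_content_alt full_content
instance (full_content : String) (out : String × Option String) : Decidable (Spec_parse_task_full_content full_content out) := by unfold Spec_parse_task_full_content; infer_instance

-- ===== CLAIM (what is proved, stated in full; the proofs are below) =====
def Claim_equal_parse_task_full_content : Prop := ∀ (full_content : String), Dom_parse_task_full_content full_content → Spec_parse_task_full_content full_content (parse_task_full_content full_content)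

-- ===== LEMMAS AND PROOFS =====

theorem pvSplitKeepAux_flatten (cur s : List Char) :
    (pvSplitKeepAux cur s).flatten = cur.reverse ++ s := by
  fun_induction pvSplitKeepAux cur s with
  | case3 cur rest h ih => obtain ⟨t, rfl⟩ := List.head?_eq_some_iff.mp h; simp_all
  | _ => simp_all [List.isEmpty_iff]

theorem pvSplitKeep_flatten (s : List Char) : (pvSplitKeep s).flatten = s := by
  simp [pvSplitKeep, pvSplitKeepAux_flatten]

-- how A's loop body acts in each state
theorem pvStep_content (t : List Char) (c : Option (List Char)) (l : List Char) :
    pvAStep (t, c, PvMode.content) l = (t, some (c.getD [] ++ l), PvMode.content) := by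
  simp [pvAStep]

theorem pvStep_number_boundary (t l : List Char)
    (h : PySem.Chars.startswith l ['\n'] = true) :
    pvAStep (t, none, PvMode.number_title) l = (t, some l, PvMode.content) := by
  simp [pvAStep, h]

theorem pvStep_number_go (t : List Char) (c : Option (List Char)) (l : List Char)
    (h : PySem.Chars.startswith l ['\n'] = false) :
    pvAStep (t, c, PvMode.number_title) l = (t ++ l, c, PvMode.number_title) := by
  simp [pvAStep, h]

theorem pvStep_title_boundary (t : List Char) (c : Option (List Char)) (l : List Char)
    (h : PySem.Chars.startswith l ['=', '=', '='] = true) :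
    pvAStep (t, c, PvMode.title) l = (t, c, PvMode.content) := by
  simp [pvAStep, h]

theorem pvStep_title_go (t : List Char) (c : Option (List Char)) (l : List Char)
    (h : PySem.Chars.startswith l ['=', '=', '='] = false) :
    pvAStep (t, c, PvMode.title) l = (t ++ l, c, PvMode.title) := by
  simp [pvAStep, h]

-- once A is in content mode, every remaining line is appended to content
theorem pvFold_content (ls : List (List Char)) (t : List Char) (c : Option (List Char)) :
    ls.foldl pvAStep (t, c, PvMode.content) =
      (t, if ls.isEmpty then c else some (c.getD [] ++ ls.flatten), PvMode.content) := by
  induction ls generalizing c with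
  | nil => simp
  | cons l ls ih =>
    rw [List.foldl_cons, pvStep_content, ih]
    cases ls <;> simp

-- number_title mode: title grows until the first line starting with '\n'; from it on, content
theorem pvFold_number (ls : List (List Char)) (t : List Char) :
    ls.foldl pvAStep (t, none, PvMode.number_title) =
      match ls.findIdx? (fun l => PySem.Chars.startswith l ['\n']) with
      | none => (t ++ ls.flatten, none, PvMode.number_title)
      | some i => (t ++ (ls.take i).flatten, some (ls.drop i).flatten, PvMode.content) := by
  induction ls generalizing t with
  | nil => simp
  | cons l ls ih =>
    by_cases h : PySem.Chars.startswith l ['\n']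
    · rw [List.foldl_cons, pvStep_number_boundary _ _ h, pvFold_content]
      simp only [List.findIdx?_cons, h]
      cases ls <;> simp
    · rw [List.foldl_cons, pvStep_number_go _ _ _ (by simpa using h), ih]
      simp only [List.findIdx?_cons, h]
      cases hf : ls.findIdx? (fun l => PySem.Chars.startswith l ['\n']) <;>
        simp [List.append_assoc]

-- title mode: title grows until the first line starting with '==='; that line is dropped
theorem pvFold_title (ls : List (List Char)) (t : List Char) :
    ls.foldl pvAStep (t, none, PvMode.title) =
      match ls.findIdx? (fun l => PySem.Chars.startswith l ['=', '=', '=']) with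
      | none => (t ++ ls.flatten, none, PvMode.title)
      | some i => (t ++ (ls.take i).flatten,
          if (ls.drop (i + 1)).isEmpty then none else some (ls.drop (i + 1)).flatten,
          PvMode.content) := by
  induction ls generalizing t with
  | nil => simp
  | cons l ls ih =>
    by_cases h : PySem.Chars.startswith l ['=', '=', '=']
    · rw [List.foldl_cons, pvStep_title_boundary _ _ _ h, pvFold_content]
      simp [List.findIdx?_cons, h]
    · rw [List.foldl_cons, pvStep_title_go _ _ _ (by simpa using h), ih]
      simp only [List.findIdx?_cons, h]
      cases hf : ls.findIdx? (fun l => PySem.Chars.startswith l ['=', '=', '=']) <;>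
        simp [List.append_assoc]

-- ===== VERDICT (by name: the statement is the Claim_ definition above) =====
theorem parse_task_full_content_spec : Claim_equal_parse_task_full_content := by
  intro full_content _
  unfold Spec_parse_task_full_content parse_task_full_content parse_task_full_content_alt
  by_cases hm : PySem.Chars.startswith full_content.toList ['#', ' ']
  · simp only [hm, reduceIte]
    rw [pvFold_number]
    cases hf : (pvSplitKeep full_content.toList).findIdx?
        (fun l => PySem.Chars.startswith l ['\n']) <;>
      simp [pvSplitKeep_flatten]
  · simp only [(by simpa using hm : PySem.Chars.startswith full_content.toList ['#', ' '] = false),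
      Bool.false_eq_true, reduceIte]
    rw [pvFold_title]
    cases hf : (pvSplitKeep full_content.toList).findIdx?
        (fun l => PySem.Chars.startswith l ['=', '=', '=']) <;>
      simp [pvSplitKeep_flatten]
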